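-- pv_equiv track=rewrite | github.com/tonmoy50/Indiana-University | Fall 2023/B503/Homework4/Problem4.py | calculate_grundy_numbers
-- ===== SOURCE A (Python) =====
-- import math
--
-- def calculate_grundy_numbers(n):
--     grundy_numbers = [0] * (n + 1)
--
--     for i in range(2, n + 1):
--         factors = set()
--         for j in range(1, int(math.sqrt(i)) + 1):
--             if i % j == 0:
--                 factors.add(grundy_numbers[j])
--                 factors.add(grundy_numbers[i // j])
--
--         mex = 0
--         while mex in factors:
--             mex += 1
--
--         grundy_numbers[i] = mex
--
--     return grundy_numbers
-- ===== SOURCE B (Python) =====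
-- def calculate_grundy_numbers(n):
--     grundy_numbers = [0] * (n + 1)
--     # factor-grundy sieve: sets[m] collects the grundy numbers of the
--     # proper divisors d >= 2 of m, pushed when d is processed
--     sets = [set() for _ in range(n + 1)]
--     for i in range(2, n + 1):
--         factors = sets[i] | {0}
--         mex = 0
--         while mex in factors:
--             mex += 1
--         grundy_numbers[i] = mex
--         for m in range(2 * i, n + 1, i):
--             sets[m].add(mex)
--     return grundy_numbers
-- ===== Notes on version B (the rewrite author's own statement) =====
-- stated objective: faster
-- what changed: Instead of scanning 1..sqrt(i) for each i to collect divisor grundy values, B maintains per-index factor sets and, after computing grundy[i], pushes it onto the sets of all multiples of i (a divisor sieve), so each i's mex is taken over an already-collected set.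
import Mathlib
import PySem

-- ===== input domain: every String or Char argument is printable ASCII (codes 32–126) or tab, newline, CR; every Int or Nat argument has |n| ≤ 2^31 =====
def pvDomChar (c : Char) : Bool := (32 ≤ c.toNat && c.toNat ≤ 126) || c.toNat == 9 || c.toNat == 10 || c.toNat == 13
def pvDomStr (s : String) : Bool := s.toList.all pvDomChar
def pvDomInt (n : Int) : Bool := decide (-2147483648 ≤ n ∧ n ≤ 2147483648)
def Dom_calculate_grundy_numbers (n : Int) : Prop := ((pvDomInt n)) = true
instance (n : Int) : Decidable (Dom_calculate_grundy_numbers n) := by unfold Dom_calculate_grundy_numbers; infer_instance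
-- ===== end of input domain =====

-- B replaces A's per-i sqrt scan for divisors by a divisor sieve that pushes each computed
-- grundy number to the factor sets of its multiples; measurably faster on large n.


-- ===== PORT A =====
-- `while mex in factors: mex += 1` (this loop appears verbatim in both A and B): fuel
-- `factors.length + 1` always suffices, since the loop can only step on a member of the
-- set and a Set's elements are distinct.
def pyMexGo (factors : PySem.Set Int) : Nat → Int → Int
  | 0, m => m
  | fuel + 1, m => if factors.contains m then pyMexGo factors fuel (m + 1) else m

-- the inner `for j in range(1, int(math.sqrt(i)) + 1)` loop building `factors`;
-- `int(math.sqrt(i))` is ported as `Nat.sqrt`, exact for 0 ≤ i ≤ 2^31 (the float sqrt of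
-- such i is correctly rounded and never reaches the next integer); the list indices are
-- always in range here, so `grundy_numbers[...]` is `pyGetD`.
def innerA (grundy : List Int) (i : Int) : PySem.Set Int :=
  (PySem.List.pyRange 1 ((Nat.sqrt i.toNat : Int) + 1) 1).foldl
    (fun factors j =>
      if PySem.Int.mod i j = 0 then
        PySem.Set.add (PySem.Set.add factors (PySem.List.pyGetD grundy j 0))
          (PySem.List.pyGetD grundy (PySem.Int.floordiv i j) 0)
      else factors)
    PySem.Set.empty

-- one iteration of A's `for i in range(2, n + 1)` loop
def stepA (grundy : List Int) (i : Int) : List Int :=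
  let factors := innerA grundy i
  let mex := pyMexGo factors (factors.length + 1) 0
  grundy.set i.toNat mex

def calculate_grundy_numbers (n : Int) : List Int :=
  (PySem.List.pyRange 2 (n + 1) 1).foldl stepA (List.replicate (n + 1).toNat 0)

-- ===== PORT B =====
-- one iteration of B's loop over the state (grundy_numbers, sets):
-- mex of sets[i] | {0}, write it to grundy_numbers[i], push it onto sets[m] for the
-- multiples m of i (`for m in range(2 * i, n + 1, i)`)
def stepB (n : Int) (st : List Int × List (PySem.Set Int)) (i : Int) :
    List Int × List (PySem.Set Int) :=
  let factors := PySem.Set.union (PySem.List.pyGetD st.2 i PySem.Set.empty) [0]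
  let mex := pyMexGo factors (factors.length + 1) 0
  (st.1.set i.toNat mex,
   (PySem.List.pyRange (2 * i) (n + 1) i).foldl
     (fun sets m => sets.modify m.toNat (fun s => PySem.Set.add s mex)) st.2)

-- `[set() for _ in range(n + 1)]` is a replicate of empty sets
def calculate_grundy_numbers_alt (n : Int) : List Int :=
  ((PySem.List.pyRange 2 (n + 1) 1).foldl (stepB n)
    (List.replicate (n + 1).toNat 0, List.replicate (n + 1).toNat PySem.Set.empty)).1

-- ===== PRECONDITION & SPEC =====
def Spec_calculate_grundy_numbers (n : Int) (out : List Int) : Prop := out = calculate_grundy_numbers_alt n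
instance (n : Int) (out : List Int) : Decidable (Spec_calculate_grundy_numbers n out) := by unfold Spec_calculate_grundy_numbers; infer_instance

-- ===== CLAIM (what is proved, stated in full; the proofs are below) =====
def Claim_equal_calculate_grundy_numbers : Prop := ∀ (n : Int), Dom_calculate_grundy_numbers n → Spec_calculate_grundy_numbers n (calculate_grundy_numbers n)

-- ===== LEMMAS AND PROOFS =====

-- the least natural number (as an integer) not in the finite set T
noncomputable def mexZ (T : Finset ℤ) : ℤ := ((sInf {x : ℕ | (x : ℤ) ∉ T} : ℕ) : ℤ)

-- the grundy number both programs compute: 0 for i ≤ 1, else the mex of {0} together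
-- with the grundy numbers of the proper divisors of i
noncomputable def G : ℕ → ℤ
  | i =>
    if _h : i ≤ 1 then 0
    else mexZ (insert 0 (((Nat.divisors i).erase i).attach.image (fun d => G d.1)))
  termination_by i => i
  decreasing_by
    rename_i hd
    have h1 := Finset.mem_erase.mp d.2
    have h2 := (Nat.mem_divisors.mp h1.2)
    exact lt_of_le_of_ne (Nat.le_of_dvd (Nat.pos_of_ne_zero h2.2) h2.1) h1.1

-- the factor set of i (grundy numbers of the proper divisors of i, together with 0)
noncomputable def SG (i : ℕ) : Finset ℤ := insert 0 (((Nat.divisors i).erase i).image G)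

lemma G_le_one (k : ℕ) (h : k ≤ 1) : G k = 0 := by
  rw [G, dif_pos h]

-- invariant of the grundy array once the entries below I are computed
def GInv (n I : ℤ) (g : List ℤ) : Prop :=
  g.length = (n + 1).toNat ∧ ∀ k : ℕ, k < g.length → g.getD k 0 = if (k : ℤ) < I then G k else 0

-- invariant of B's sets: sets[m] holds exactly the grundy numbers of the divisors d of m
-- with 2 ≤ d < I, d ≠ m
def SInv (n I : ℤ) (sets : List (PySem.Set ℤ)) : Prop :=
  sets.length = (n + 1).toNat ∧ ∀ m : ℕ, 2 ≤ m → m < sets.length →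
    List.Nodup (sets.getD m []) ∧
      ∀ x : ℤ, x ∈ sets.getD m [] ↔ ∃ d : ℕ, 2 ≤ d ∧ (d : ℤ) < I ∧ d ∣ m ∧ d ≠ m ∧ x = G d

lemma mexP_nonempty (T : Finset ℤ) : {x : ℕ | (x : ℤ) ∉ T}.Nonempty := by
  refine ⟨T.sup Int.toNat + 1, fun hmem => ?_⟩
  have h2 := Finset.le_sup (f := Int.toNat) hmem
  rw [Int.toNat_natCast] at h2
  omega

lemma mexZ_not_mem (T : Finset ℤ) : mexZ T ∉ T :=
  Nat.sInf_mem (mexP_nonempty T)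

lemma mexZ_mem_of_lt (T : Finset ℤ) (j : ℕ) (h : (j : ℤ) < mexZ T) : (j : ℤ) ∈ T := by
  by_contra hj
  have := Nat.sInf_le (s := {x : ℕ | (x : ℤ) ∉ T}) hj
  unfold mexZ at h
  omega

lemma pyMexGo_step (s : PySem.Set ℤ) (T : Finset ℤ) (hT : ∀ x, x ∈ s ↔ x ∈ T) :
    ∀ (fuel : Nat) (m : ℕ), (m : ℤ) ≤ mexZ T → (mexZ T).toNat - m < fuel →
      pyMexGo s fuel (m : ℤ) = mexZ T := by
  intro fuel
  induction fuel with
  | zero => omega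
  | succ f ih =>
    intro m hle hf
    rcases eq_or_lt_of_le hle with heq | hlt
    · have hnm : ¬ ((m : ℤ) ∈ s) := by rw [hT, heq]; exact mexZ_not_mem T
      rw [pyMexGo]
      rw [if_neg (by simpa [PySem.Set.contains_iff] using hnm)]
      exact heq
    · have hm : (m : ℤ) ∈ s := (hT _).mpr (mexZ_mem_of_lt T m hlt)
      rw [pyMexGo, if_pos (by simpa [PySem.Set.contains_iff] using hm)]
      have : ((m : ℤ)) + 1 = ((m + 1 : ℕ) : ℤ) := by push_cast; ring
      rw [this]
      exact ih (m + 1) (by omega) (by omega)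

lemma pyMexGo_eq_mexZ (s : PySem.Set ℤ) (T : Finset ℤ)
    (_hnd : List.Nodup s) (hT : ∀ x, x ∈ s ↔ x ∈ T) : pyMexGo s (s.length + 1) 0 = mexZ T := by
  have hnn : 0 ≤ mexZ T := Int.natCast_nonneg _
  have hlen : (mexZ T).toNat ≤ s.length := by
    have hsub : (List.map (fun k : ℕ => (k : ℤ)) (List.range (mexZ T).toNat)) ⊆ s := by
      intro x hx
      rw [List.mem_map] at hx
      obtain ⟨k, hk, hkx⟩ := hx
      rw [List.mem_range] at hk
      subst hkx
      exact (hT _).mpr (mexZ_mem_of_lt T k (by omega))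
    have hndr : (List.map (fun k : ℕ => (k : ℤ)) (List.range (mexZ T).toNat)).Nodup :=
      List.Nodup.map (fun a b h => by exact_mod_cast h) List.nodup_range
    have := (List.subperm_of_subset hndr hsub).length_le
    simpa using this
  have := pyMexGo_step s T hT (s.length + 1) 0 (by omega) (by omega)
  simpa using this

lemma G_eq (i : ℕ) (h : 2 ≤ i) : G i = mexZ (SG i) := by
  rw [G, dif_neg (by omega)]
  unfold SG
  congr 1
  ext x
  simp

lemma mem_foldl_add2 (p : ℤ → Prop) [DecidablePred p] (f h : ℤ → ℤ) :
    ∀ (l : List ℤ) (s0 : PySem.Set ℤ) (x : ℤ),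
      x ∈ l.foldl (fun s j => if p j then PySem.Set.add (PySem.Set.add s (f j)) (h j) else s) s0 ↔
        x ∈ s0 ∨ ∃ j ∈ l, p j ∧ (x = f j ∨ x = h j) := by
  intro l
  induction l with
  | nil => simp
  | cons a l ih =>
    intro s0 x
    simp only [List.foldl_cons, ih, List.mem_cons]
    by_cases hp : p a
    · rw [if_pos hp]
      simp only [PySem.Set.mem_add]
      constructor
      · rintro (((hx | hx) | hx) | ⟨j, hj, hpj, hx⟩)
        · exact Or.inl hx
        · exact Or.inr ⟨a, Or.inl rfl, hp, Or.inl hx⟩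
        · exact Or.inr ⟨a, Or.inl rfl, hp, Or.inr hx⟩
        · exact Or.inr ⟨j, Or.inr hj, hpj, hx⟩
      · rintro (hx | ⟨j, (rfl | hj), hpj, hx⟩)
        · exact Or.inl (Or.inl (Or.inl hx))
        · rcases hx with hx | hx
          · exact Or.inl (Or.inl (Or.inr hx))
          · exact Or.inl (Or.inr hx)
        · exact Or.inr ⟨j, hj, hpj, hx⟩
    · rw [if_neg hp]
      constructor
      · rintro (hx | ⟨j, hj, hpj, hx⟩)
        · exact Or.inl hx
        · exact Or.inr ⟨j, Or.inr hj, hpj, hx⟩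
      · rintro (hx | ⟨j, (rfl | hj), hpj, hx⟩)
        · exact Or.inl hx
        · exact absurd hpj hp
        · exact Or.inr ⟨j, hj, hpj, hx⟩

lemma nodup_foldl_add2 (p : ℤ → Prop) [DecidablePred p] (f h : ℤ → ℤ) :
    ∀ (l : List ℤ) (s0 : PySem.Set ℤ), List.Nodup s0 →
      List.Nodup (l.foldl (fun s j => if p j then PySem.Set.add (PySem.Set.add s (f j)) (h j) else s) s0) := by
  intro l
  induction l with
  | nil => intro s0 h0; simpa using h0
  | cons a l ih =>
    intro s0 h0
    simp only [List.foldl_cons]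
    by_cases hp : p a
    · rw [if_pos hp]
      exact ih _ (PySem.Set.nodup_add _ _ (PySem.Set.nodup_add _ _ h0))
    · rw [if_neg hp]
      exact ih _ h0

lemma mem_innerA (grundy : List Int) (i : Int) (x : ℤ) :
    x ∈ innerA grundy i ↔ ∃ j ∈ PySem.List.pyRange 1 ((Nat.sqrt i.toNat : Int) + 1) 1,
      PySem.Int.mod i j = 0 ∧
        (x = PySem.List.pyGetD grundy j 0 ∨ x = PySem.List.pyGetD grundy (PySem.Int.floordiv i j) 0) := by
  unfold innerA
  have := mem_foldl_add2 (fun j => PySem.Int.mod i j = 0)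
    (fun j => PySem.List.pyGetD grundy j 0)
    (fun j => PySem.List.pyGetD grundy (PySem.Int.floordiv i j) 0)
    (PySem.List.pyRange 1 ((Nat.sqrt i.toNat : Int) + 1) 1) PySem.Set.empty x
  simpa [PySem.Set.empty] using this

lemma nodup_innerA (grundy : List Int) (i : Int) : List.Nodup (innerA grundy i) := by
  unfold innerA
  exact nodup_foldl_add2 _ _ _ _ _ (by simp [PySem.Set.empty])

lemma innerA_eq_SG (n i : ℤ) (h2 : 2 ≤ i) (hin : i ≤ n) (g : List ℤ) (hg : GInv n i g) (x : ℤ) :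
    x ∈ innerA g i ↔ x ∈ SG i.toNat := by
  obtain ⟨iN, rfl⟩ : ∃ m : ℕ, i = (m : ℤ) := ⟨i.toNat, (Int.toNat_of_nonneg (by omega)).symm⟩
  have hiN2 : 2 ≤ iN := by exact_mod_cast h2
  obtain ⟨hlen, hval⟩ := hg
  have hlen' : iN < g.length := by rw [hlen]; omega
  -- value read at a natural index d
  have hread : ∀ d : ℕ, d ≤ iN → PySem.List.pyGetD g (d : ℤ) 0 = if d < iN then G d else 0 := by
    intro d hd
    rw [PySem.List.pyGetD_natCast]
    rw [hval d (by omega)]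
    by_cases hdi : d < iN
    · rw [if_pos (by exact_mod_cast hdi), if_pos hdi]
    · rw [if_neg (by exact_mod_cast hdi), if_neg hdi]
  rw [mem_innerA, Int.toNat_natCast]
  simp only [PySem.List.mem_pyRange_one]
  constructor
  · rintro ⟨j, ⟨hj1, hj2⟩, hmod, hx⟩
    obtain ⟨jN, rfl⟩ : ∃ m : ℕ, j = (m : ℤ) := ⟨j.toNat, (Int.toNat_of_nonneg (by omega)).symm⟩
    have hjs : jN ≤ Nat.sqrt iN := by omega
    have hdvd : jN ∣ iN := by
      rw [PySem.Int.mod_eq_zero_iff_dvd] at hmod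
      exact_mod_cast hmod
    have hj1' : 1 ≤ jN := by exact_mod_cast hj1
    have hjlt : jN < iN := lt_of_le_of_lt hjs (Nat.sqrt_lt_self (by omega))
    rcases hx with hx | hx
    · -- x = g[jN] = G jN, jN a proper divisor
      rw [hread jN (by omega), if_pos hjlt] at hx
      subst hx
      exact Finset.mem_insert_of_mem (Finset.mem_image_of_mem G
        (Finset.mem_erase.mpr ⟨by omega, Nat.mem_divisors.mpr ⟨hdvd, by omega⟩⟩))
    · -- x = g[iN / jN]
      rw [PySem.Int.floordiv_natCast] at hx
      set e := iN / jN with he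
      have hedvd : e ∣ iN := Nat.div_dvd_of_dvd hdvd
      have hele : e ≤ iN := Nat.div_le_self _ _
      rw [hread e hele] at hx
      by_cases hei : e < iN
      · rw [if_pos hei] at hx
        subst hx
        exact Finset.mem_insert_of_mem (Finset.mem_image_of_mem G
          (Finset.mem_erase.mpr ⟨by omega, Nat.mem_divisors.mpr ⟨hedvd, by omega⟩⟩))
      · rw [if_neg hei] at hx
        subst hx
        exact Finset.mem_insert_self 0 _
  · intro hx
    rcases Finset.mem_insert.mp hx with rfl | hx
    · -- x = 0 : witnessed by j = 1, reading g[i // 1] = g[i] = 0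
      refine ⟨1, ⟨le_refl _, by have := Nat.sqrt_pos.mpr (show 0 < iN by omega); omega⟩, ?_, ?_⟩
      · rw [PySem.Int.mod_eq_zero_iff_dvd]; exact one_dvd _
      · right
        have : PySem.Int.floordiv (iN : ℤ) ((1 : ℕ) : ℤ) = ((iN / 1 : ℕ) : ℤ) := PySem.Int.floordiv_natCast iN 1
        simp only [Nat.cast_one] at this
        rw [this]
        simp only [Nat.div_one]
        rw [hread iN (le_refl _), if_neg (by omega)]
    · obtain ⟨d, hd, rfl⟩ := Finset.mem_image.mp hx
      obtain ⟨hdne, hddvd⟩ := Finset.mem_erase.mp hd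
      obtain ⟨hdvd, hi0⟩ := Nat.mem_divisors.mp hddvd
      have hd1 : 1 ≤ d := Nat.one_le_iff_ne_zero.mpr (by rintro rfl; simp at hdvd; omega)
      have hdlt : d < iN := lt_of_le_of_ne (Nat.le_of_dvd (by omega) hdvd) hdne
      by_cases hds : d ≤ Nat.sqrt iN
      · refine ⟨(d : ℤ), ⟨by exact_mod_cast hd1, by exact_mod_cast (show (d:ℤ) < (Nat.sqrt iN : ℤ) + 1 by omega)⟩, ?_, ?_⟩
        · rw [PySem.Int.mod_eq_zero_iff_dvd]; exact_mod_cast hdvd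
        · left; rw [hread d (by omega), if_pos hdlt]
      · -- use the cofactor e = iN / d ≤ sqrt iN
        set e := iN / d with he
        have hed : e * d = iN := Nat.div_mul_cancel hdvd
        have he1 : 1 ≤ e := (Nat.one_le_div_iff (by omega)).mpr (by omega)
        have hdd : iN < d * d := by
          have h' : iN < d ^ 2 := Nat.sqrt_lt'.mp (by omega)
          nlinarith
        have helt : e < d := by nlinarith
        have hes : e ≤ Nat.sqrt iN := Nat.le_sqrt.mpr (by nlinarith)
        refine ⟨(e : ℤ), ⟨by exact_mod_cast he1, by exact_mod_cast (show (e:ℤ) < (Nat.sqrt iN : ℤ) + 1 by omega)⟩, ?_, ?_⟩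
        · rw [PySem.Int.mod_eq_zero_iff_dvd]
          exact_mod_cast Nat.div_dvd_of_dvd hdvd
        · right
          rw [PySem.Int.floordiv_natCast]
          have : iN / e = d := Nat.div_div_self hdvd (by omega)
          rw [this, hread d (by omega), if_pos hdlt]

lemma getD_set (g : List ℤ) (j : ℕ) (v : ℤ) (k : ℕ) (hk : k < g.length) :
    (g.set j v).getD k 0 = if j = k then v else g.getD k 0 := by
  rw [List.getD_eq_getElem?_getD, List.getD_eq_getElem?_getD, List.getElem?_set]
  by_cases h1 : j = k
  · subst h1
    rw [if_pos rfl, if_pos rfl, if_pos hk]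
    rfl
  · rw [if_neg h1, if_neg h1]

lemma stepA_mex (n i : ℤ) (h2 : 2 ≤ i) (hin : i ≤ n) (g : List ℤ) (hg : GInv n i g) :
    stepA g i = g.set i.toNat (G i.toNat) := by
  show g.set i.toNat (pyMexGo (innerA g i) ((innerA g i).length + 1) 0) = _
  rw [pyMexGo_eq_mexZ _ (SG i.toNat) (nodup_innerA g i) (innerA_eq_SG n i h2 hin g hg)]
  rw [← G_eq _ (by omega)]

lemma stepA_inv (n i : ℤ) (h2 : 2 ≤ i) (hin : i ≤ n) (g : List ℤ) (hg : GInv n i g) :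
    GInv n (i + 1) (stepA g i) := by
  rw [stepA_mex n i h2 hin g hg]
  obtain ⟨hlen, hval⟩ := hg
  refine ⟨by simpa using hlen, ?_⟩
  intro k hk
  rw [List.length_set] at hk
  rw [getD_set g i.toNat (G i.toNat) k hk]
  by_cases hik : i.toNat = k
  · subst hik
    rw [if_pos rfl, if_pos (by omega)]
  · rw [if_neg hik, hval k hk]
    have : (k : ℤ) ≠ i := by omega
    by_cases hki : (k : ℤ) < i
    · rw [if_pos hki, if_pos (by omega)]
    · rw [if_neg hki, if_neg (by omega)]

lemma foldA_inv (n : ℤ) (t : ℕ) (ht : 2 + (t : ℤ) ≤ n + 1) :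
    GInv n (2 + t) ((PySem.List.pyRange 2 (2 + (t : ℤ)) 1).foldl stepA (List.replicate (n + 1).toNat 0)) := by
  induction t with
  | zero =>
    rw [show ((0 : ℕ) : ℤ) = 0 by rfl, add_zero, PySem.List.pyRange_one_eq_nil (by omega)]
    refine ⟨by simp, ?_⟩
    intro k hk
    simp only [List.foldl_nil] at hk ⊢
    rw [List.getD_eq_getElem?_getD, List.getElem?_replicate]
    rw [List.length_replicate] at hk
    rw [if_pos hk]
    by_cases h2 : (k : ℤ) < 2
    · rw [if_pos h2, G_le_one k (by omega)]; rfl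
    · rw [if_neg h2]; rfl
  | succ t ih =>
    have h1 : (2 : ℤ) + ((t + 1 : ℕ) : ℤ) = (2 + (t : ℤ)) + 1 := by push_cast; ring
    rw [h1, PySem.List.pyRange_one_succ_right (by omega), List.foldl_append, List.foldl_cons, List.foldl_nil]
    exact stepA_inv n (2 + t) (by omega) (by omega) _ (ih (by omega))

lemma length_foldl_modify {α : Type} (f : α → α) (l : List ℤ) (ss : List α) :
    (l.foldl (fun ss m => ss.modify m.toNat f) ss).length = ss.length := by
  induction l generalizing ss with
  | nil => rfl
  | cons a l ih => rw [List.foldl_cons, ih, List.length_modify]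

lemma getElem?_foldl_modify {α : Type} (f : α → α) (l : List ℤ)
    (hpos : ∀ m ∈ l, 0 ≤ m) (hnd : l.Nodup) (ss : List α) (k : ℕ) :
    (l.foldl (fun ss m => ss.modify m.toNat f) ss)[k]? =
      if (k : ℤ) ∈ l then ss[k]?.map f else ss[k]? := by
  induction l generalizing ss with
  | nil => simp
  | cons a l ih =>
    rw [List.foldl_cons, ih (fun m hm => hpos m (List.mem_cons_of_mem a hm)) hnd.of_cons]
    have ha : 0 ≤ a := hpos a List.mem_cons_self
    by_cases hka : (k : ℤ) = a
    · have hkn : a.toNat = k := by omega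
      have hnra : (k : ℤ) ∉ l := hka ▸ (List.nodup_cons.mp hnd).1
      rw [if_neg hnra, if_pos (by simp [hka]), List.getElem?_modify, hkn]
      cases ss[k]? <;> simp
    · have hmod : (ss.modify a.toNat f)[k]? = ss[k]? := by
        rw [List.getElem?_modify]
        have : a.toNat ≠ k := by omega
        cases ss[k]? <;> simp [this]
      rw [hmod]
      by_cases hkl : (k : ℤ) ∈ l
      · rw [if_pos hkl, if_pos (List.mem_cons_of_mem a hkl)]
      · rw [if_neg hkl, if_neg (by simp [hka, hkl])]

lemma nodup_pyRange_pos (a b s : ℤ) (hs : 0 < s) : (PySem.List.pyRange a b s).Nodup := by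
  rw [PySem.List.pyRange_of_pos a b hs]
  exact List.Nodup.map (fun x y h => by simp at h; omega) List.nodup_range

-- B's factor set at i is exactly SG i

lemma factorsB_eq_SG (n i : ℤ) (h2 : 2 ≤ i) (hin : i ≤ n) (sets : List (PySem.Set ℤ))
    (hs : SInv n i sets) (x : ℤ) :
    x ∈ PySem.Set.union (PySem.List.pyGetD sets i PySem.Set.empty) [0] ↔ x ∈ SG i.toNat := by
  obtain ⟨iN, rfl⟩ : ∃ m : ℕ, i = (m : ℤ) := ⟨i.toNat, (Int.toNat_of_nonneg (by omega)).symm⟩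
  have hiN2 : 2 ≤ iN := by exact_mod_cast h2
  obtain ⟨hlen, hmem⟩ := hs
  have hlt : iN < sets.length := by rw [hlen]; omega
  rw [PySem.List.pyGetD_natCast]
  rw [PySem.Set.mem_union, Int.toNat_natCast]
  have hgd : sets.getD iN PySem.Set.empty = sets.getD iN [] := rfl
  rw [hgd, (hmem iN hiN2 hlt).2 x, List.mem_singleton]
  unfold SG
  constructor
  · rintro (⟨d, hd2, hdi, hdvd, hdne, rfl⟩ | rfl)
    · exact Finset.mem_insert_of_mem (Finset.mem_image_of_mem G
        (Finset.mem_erase.mpr ⟨hdne, Nat.mem_divisors.mpr ⟨hdvd, by omega⟩⟩))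
    · exact Finset.mem_insert_self 0 _
  · intro hx
    rcases Finset.mem_insert.mp hx with rfl | hx
    · exact Or.inr rfl
    · obtain ⟨d, hd, rfl⟩ := Finset.mem_image.mp hx
      obtain ⟨hdne, hddvd⟩ := Finset.mem_erase.mp hd
      obtain ⟨hdvd, hi0⟩ := Nat.mem_divisors.mp hddvd
      have hd1 : 1 ≤ d := Nat.one_le_iff_ne_zero.mpr (by rintro rfl; simp at hdvd; omega)
      by_cases hd2 : 2 ≤ d
      · have hdlt : d < iN := lt_of_le_of_ne (Nat.le_of_dvd (by omega) hdvd) hdne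
        exact Or.inl ⟨d, hd2, by exact_mod_cast hdlt, hdvd, hdne, rfl⟩
      · have : d = 1 := by omega
        subst this
        exact Or.inr (G_le_one 1 le_rfl)

lemma nodup_factorsB (n i : ℤ) (h2 : 2 ≤ i) (hin : i ≤ n) (sets : List (PySem.Set ℤ))
    (hs : SInv n i sets) :
    List.Nodup (PySem.Set.union (PySem.List.pyGetD sets i PySem.Set.empty) [0]) := by
  obtain ⟨hlen, hmem⟩ := hs
  have hlt : i.toNat < sets.length := by omega
  have := (hmem i.toNat (by omega) hlt).1
  have hidx : PySem.List.pyGetD sets i PySem.Set.empty = sets.getD i.toNat [] := by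
    rw [show i = ((i.toNat : ℕ) : ℤ) by omega, PySem.List.pyGetD_natCast, Int.toNat_natCast]
    rfl
  rw [hidx]
  exact PySem.Set.nodup_union _ _ this

lemma stepB_inv (n i : ℤ) (h2 : 2 ≤ i) (hin : i ≤ n) (st : List ℤ × List (PySem.Set ℤ))
    (hg : GInv n i st.1) (hs : SInv n i st.2) :
    GInv n (i + 1) (stepB n st i).1 ∧ SInv n (i + 1) (stepB n st i).2 := by
  have hmex : pyMexGo (PySem.Set.union (PySem.List.pyGetD st.2 i PySem.Set.empty) [0])
      ((PySem.Set.union (PySem.List.pyGetD st.2 i PySem.Set.empty) [0]).length + 1) 0 = G i.toNat := by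
    rw [pyMexGo_eq_mexZ _ (SG i.toNat) (nodup_factorsB n i h2 hin st.2 hs)
      (factorsB_eq_SG n i h2 hin st.2 hs)]
    rw [← G_eq _ (by omega)]
  constructor
  · -- grundy part: identical to A's update
    show GInv n (i + 1) (st.1.set i.toNat _)
    rw [hmex]
    obtain ⟨hlen, hval⟩ := hg
    refine ⟨by simpa using hlen, ?_⟩
    intro k hk
    rw [List.length_set] at hk
    rw [getD_set st.1 i.toNat (G i.toNat) k hk]
    by_cases hik : i.toNat = k
    · subst hik
      rw [if_pos rfl, if_pos (by omega)]
    · rw [if_neg hik, hval k hk]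
      by_cases hki : (k : ℤ) < i
      · rw [if_pos hki, if_pos (by omega)]
      · rw [if_neg hki, if_neg (by omega)]
  · -- sets part
    show SInv n (i + 1) ((PySem.List.pyRange (2 * i) (n + 1) i).foldl
      (fun sets m => sets.modify m.toNat (fun s => PySem.Set.add s _)) st.2)
    rw [hmex]
    obtain ⟨hlen, hmem⟩ := hs
    have hpos : ∀ m ∈ PySem.List.pyRange (2 * i) (n + 1) i, 0 ≤ m := by
      intro m hm
      have := (PySem.List.mem_pyRange_iff_of_pos (by omega) m).mp hm
      omega
    have hnd := nodup_pyRange_pos (2 * i) (n + 1) i (by omega)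
    refine ⟨by rw [length_foldl_modify]; exact hlen, ?_⟩
    intro m hm2 hmlt
    rw [length_foldl_modify] at hmlt
    have hgetD : ∀ (ss : List (PySem.Set ℤ)) (k : ℕ), ss.getD k [] = (ss[k]?).getD [] := by
      intro ss k; rw [List.getD_eq_getElem?_getD]
    rw [hgetD, getElem?_foldl_modify _ _ hpos hnd st.2 m]
    have hmem_iff : ((m : ℤ) ∈ PySem.List.pyRange (2 * i) (n + 1) i) ↔ (i.toNat ∣ m ∧ 2 * i.toNat ≤ m) := by
      rw [PySem.List.mem_pyRange_iff_of_pos (by omega)]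
      constructor
      · rintro ⟨hle, hlt', hdvd⟩
        have h1 : i ∣ (m : ℤ) := by
          have : i ∣ (m : ℤ) - 2 * i + 2 * i := dvd_add hdvd ⟨2, by ring⟩
          simpa using this
        constructor
        · have : (i.toNat : ℤ) ∣ (m : ℤ) := by rwa [show ((i.toNat : ℕ) : ℤ) = i by omega]
          exact_mod_cast this
        · omega
      · rintro ⟨hdvd, hle⟩
        have h1 : i ∣ (m : ℤ) := by
          have : ((i.toNat : ℕ) : ℤ) ∣ ((m : ℕ) : ℤ) := Int.natCast_dvd_natCast.mpr hdvd
          rwa [show ((i.toNat : ℕ) : ℤ) = i by omega] at this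
        refine ⟨by omega, by omega, ?_⟩
        exact dvd_sub h1 ⟨2, by ring⟩
    by_cases hpush : (m : ℤ) ∈ PySem.List.pyRange (2 * i) (n + 1) i
    · rw [if_pos hpush]
      obtain ⟨hdvd, hle⟩ := hmem_iff.mp hpush
      obtain ⟨hndm, hmemm⟩ := hmem m hm2 hmlt
      have hmap : ((st.2[m]?).map (fun s => PySem.Set.add s (G i.toNat))).getD [] =
          PySem.Set.add (st.2.getD m []) (G i.toNat) := by
        have : m < st.2.length := hmlt
        rw [List.getD_eq_getElem?_getD, List.getElem?_eq_getElem this]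
        rfl
      rw [hmap]
      refine ⟨PySem.Set.nodup_add _ _ hndm, ?_⟩
      intro x
      rw [PySem.Set.mem_add, hmemm x]
      constructor
      · rintro (⟨d, hd2, hdi, hdvd', hdne, rfl⟩ | rfl)
        · exact ⟨d, hd2, by omega, hdvd', hdne, rfl⟩
        · exact ⟨i.toNat, by omega, by omega, hdvd, by omega, rfl⟩
      · rintro ⟨d, hd2, hdi, hdvd', hdne, rfl⟩
        by_cases hdieq : d = i.toNat
        · subst hdieq; exact Or.inr rfl
        · exact Or.inl ⟨d, hd2, by omega, hdvd', hdne, rfl⟩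
    · rw [if_neg hpush, ← List.getD_eq_getElem?_getD]
      obtain ⟨hndm, hmemm⟩ := hmem m hm2 hmlt
      refine ⟨hndm, ?_⟩
      intro x
      rw [hmemm x]
      constructor
      · rintro ⟨d, hd2, hdi, hdvd', hdne, rfl⟩
        exact ⟨d, hd2, by omega, hdvd', hdne, rfl⟩
      · rintro ⟨d, hd2, hdi, hdvd', hdne, rfl⟩
        refine ⟨d, hd2, ?_, hdvd', hdne, rfl⟩
        by_cases hdieq : d = i.toNat
        · -- d = i would mean m is a proper multiple of i, i.e. m was pushed: contradiction
          exfalso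
          apply hpush
          rw [hmem_iff]
          subst hdieq
          obtain ⟨q, rfl⟩ := hdvd'
          have hq2 : 2 ≤ q := by
            rcases Nat.lt_or_ge q 2 with hq | hq
            · interval_cases q <;> omega
            · exact hq
          exact ⟨Dvd.intro q rfl, by nlinarith⟩
        · omega


lemma foldB_inv (n : ℤ) (t : ℕ) (ht : 2 + (t : ℤ) ≤ n + 1) :
    GInv n (2 + t) (((PySem.List.pyRange 2 (2 + (t : ℤ)) 1).foldl (stepB n)
      (List.replicate (n + 1).toNat 0, List.replicate (n + 1).toNat PySem.Set.empty)).1) ∧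
    SInv n (2 + t) (((PySem.List.pyRange 2 (2 + (t : ℤ)) 1).foldl (stepB n)
      (List.replicate (n + 1).toNat 0, List.replicate (n + 1).toNat PySem.Set.empty)).2) := by
  induction t with
  | zero =>
    rw [show ((0 : ℕ) : ℤ) = 0 by rfl, add_zero, PySem.List.pyRange_one_eq_nil (by omega)]
    simp only [List.foldl_nil]
    refine ⟨⟨by simp, ?_⟩, ⟨by simp, ?_⟩⟩
    · intro k hk
      rw [List.length_replicate] at hk
      rw [List.getD_eq_getElem?_getD, List.getElem?_replicate, if_pos hk]
      by_cases h2 : (k : ℤ) < 2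
      · rw [if_pos h2, G_le_one k (by omega)]; rfl
      · rw [if_neg h2]; rfl
    · intro m _hm2 hmlt
      rw [List.length_replicate] at hmlt
      rw [List.getD_eq_getElem?_getD, List.getElem?_replicate, if_pos hmlt]
      refine ⟨by simp [PySem.Set.empty], ?_⟩
      intro x
      simp only [PySem.Set.empty, Option.getD_some, List.not_mem_nil, false_iff]
      rintro ⟨d, hd2, hdi, _, _, _⟩
      omega
  | succ t ih =>
    have h1 : (2 : ℤ) + ((t + 1 : ℕ) : ℤ) = (2 + (t : ℤ)) + 1 := by push_cast; ring
    rw [h1, PySem.List.pyRange_one_succ_right (by omega), List.foldl_append, List.foldl_cons,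
      List.foldl_nil]
    obtain ⟨ihg, ihs⟩ := ih (by omega)
    exact stepB_inv n (2 + t) (by omega) (by omega) _ ihg ihs

lemma eq_of_getD (xs ys : List ℤ) (hl : xs.length = ys.length)
    (h : ∀ k, k < xs.length → xs.getD k 0 = ys.getD k 0) : xs = ys := by
  apply List.ext_getElem hl
  intro k h1 h2
  have := h k h1
  rwa [List.getD_eq_getElem?_getD, List.getD_eq_getElem?_getD, List.getElem?_eq_getElem h1,
    List.getElem?_eq_getElem h2, Option.getD_some, Option.getD_some] at this

-- ===== VERDICT (by name: the statement is the Claim_ definition above) =====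
theorem calculate_grundy_numbers_spec : Claim_equal_calculate_grundy_numbers := by
  unfold Claim_equal_calculate_grundy_numbers
  intro n _hdom
  unfold Spec_calculate_grundy_numbers calculate_grundy_numbers calculate_grundy_numbers_alt
  by_cases hn : n ≤ 0
  · rw [PySem.List.pyRange_one_eq_nil (by omega)]
    rfl
  · have hrw : n + 1 = 2 + (((n - 1).toNat : ℕ) : ℤ) := by omega
    have e : PySem.List.pyRange 2 (n + 1) 1 = PySem.List.pyRange 2 (2 + (((n - 1).toNat : ℕ) : ℤ)) 1 := by
      rw [← hrw]
    rw [e]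
    obtain ⟨hal, hav⟩ := foldA_inv n (n - 1).toNat (by omega)
    obtain ⟨⟨hbl, hbv⟩, _⟩ := foldB_inv n (n - 1).toNat (by omega)
    exact eq_of_getD _ _ (by rw [hal, hbl]) (fun k hk => by
      rw [hav k hk, hbv k (by rw [hbl, ← hal]; exact hk)])
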